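-- pv_equiv track=rewrite | github.com/SamuelOjuri/DesignAutomationAssistant | backend/app/services/email_extraction.py | _split_batched_pdf_text
-- ===== SOURCE A (Python) =====
-- from typing import Tuple, Dict, List, Union
--
-- def _split_batched_pdf_text(text: str) -> Dict[str, str]:
--     by_file: Dict[str, str] = {}
--     current_name: str | None = None
--     buffer: List[str] = []
--
--     for line in text.splitlines():
--         if line.startswith("=== PDF:"):
--             if current_name is not None:
--                 by_file[current_name] = "\n".join(buffer).strip()
--             current_name = line.replace("=== PDF:", "").replace("===", "").strip()
--             buffer = []
--         else:
--             buffer.append(line)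
--
--     if current_name is not None:
--         by_file[current_name] = "\n".join(buffer).strip()
--
--     return by_file
-- ===== SOURCE B (Python) =====
-- def _split_batched_pdf_text(text: str):
--     # Index-and-slice decomposition: locate header lines first, then cut out
--     # each file's body as a slice between consecutive headers.
--     lines = text.splitlines()
--     n = len(lines)
--     i = 0
--     while i < n and not lines[i].startswith("=== PDF:"):
--         i += 1
--     by_file = {}
--     while i < n:
--         name = lines[i].replace("=== PDF:", "").replace("===", "").strip()
--         j = i + 1
--         while j < n and not lines[j].startswith("=== PDF:"):
--             j += 1
--         by_file[name] = "\n".join(lines[i + 1:j]).strip()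
--         i = j
--     return by_file
-- ===== Notes on version B (the rewrite author's own statement) =====
-- stated objective: alternative
-- what changed: Replaces the buffered streaming state machine (current_name/buffer carried through one fold with an end-of-loop flush) by a skip-preamble-then-segment loop: find the next header, slice the body up to the following header, no carried buffer or pending-name state.
import Mathlib
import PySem

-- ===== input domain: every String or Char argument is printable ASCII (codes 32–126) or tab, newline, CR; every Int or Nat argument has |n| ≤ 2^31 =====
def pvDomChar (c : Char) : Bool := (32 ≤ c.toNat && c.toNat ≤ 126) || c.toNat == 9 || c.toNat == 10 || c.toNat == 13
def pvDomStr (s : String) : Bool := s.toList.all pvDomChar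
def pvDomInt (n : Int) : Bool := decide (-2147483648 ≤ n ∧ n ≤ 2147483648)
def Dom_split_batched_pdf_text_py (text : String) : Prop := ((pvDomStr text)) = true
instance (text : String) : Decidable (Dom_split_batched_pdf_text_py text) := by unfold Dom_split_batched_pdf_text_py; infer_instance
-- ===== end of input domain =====

-- B replaces A's streaming state machine (pending name + buffer, flushed at the next header
-- and at the end) by skip-the-preamble then a per-segment loop slicing each body; same cost.

-- shared by both ports, verbatim from the Python lines they transliterate:
def pvIsHeader (line : String) : Bool := PySem.Str.startswith line "=== PDF:"
def pvName (line : String) : String :=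
  PySem.Str.strip (PySem.Str.replace (PySem.Str.replace line "=== PDF:" "") "===" "")
def pvBody (buf : List String) : String := PySem.Str.strip (PySem.Str.join "\n" buf)

-- ===== PORT A =====
-- loop body of A's single for-loop over splitlines
def pvStepA (st : PySem.Dict String String × Option String × List String) (line : String) :
    PySem.Dict String String × Option String × List String :=
  if pvIsHeader line then
    ((match st.2.1 with
      | some n => st.1.insert n (pvBody st.2.2)
      | none => st.1), some (pvName line), [])
  else
    (st.1, st.2.1, st.2.2 ++ [line])

-- the trailing "if current_name is not None: by_file[current_name] = …" flush
def pvFlushA (st : PySem.Dict String String × Option String × List String) :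
    PySem.Dict String String :=
  match st.2.1 with
  | some n => st.1.insert n (pvBody st.2.2)
  | none => st.1

def split_batched_pdf_text_py (text : String) : List (String × String) :=
  (pvFlushA ((PySem.Str.splitlines text).foldl pvStepA (PySem.Dict.empty, none, []))).items

-- ===== PORT B =====
-- Source B's second while-loop: ls starts at a header line (or is empty); the inner
-- while computing j is the takeWhile/dropWhile split of the remaining lines.
def pvAltGo : List String → PySem.Dict String String → PySem.Dict String String
  | [], d => d
  | l :: rest, d =>
      pvAltGo (rest.dropWhile (fun s => !pvIsHeader s))
        (d.insert (pvName l) (pvBody (rest.takeWhile (fun s => !pvIsHeader s))))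
termination_by ls => ls.length
decreasing_by
  exact Nat.lt_succ_of_le (List.length_dropWhile_le _ _)

def split_batched_pdf_text_py_alt (text : String) : List (String × String) :=
  (pvAltGo ((PySem.Str.splitlines text).dropWhile (fun s => !pvIsHeader s))
    PySem.Dict.empty).items

-- ===== PRECONDITION & SPEC =====
def Spec_split_batched_pdf_text_py (text : String) (out : List (String × String)) : Prop := out = split_batched_pdf_text_py_alt text
instance (text : String) (out : List (String × String)) : Decidable (Spec_split_batched_pdf_text_py text out) := by unfold Spec_split_batched_pdf_text_py; infer_instance

-- ===== CLAIM (what is proved, stated in full; the proofs are below) =====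
def Claim_equal_split_batched_pdf_text_py : Prop := ∀ (text : String), Dom_split_batched_pdf_text_py text → Spec_split_batched_pdf_text_py text (split_batched_pdf_text_py text)

-- ===== LEMMAS AND PROOFS =====

-- mid-segment invariant: with a pending name and buffer, the rest of A's fold agrees
-- with B's segment loop on the un-consumed lines after the pending segment is closed.
theorem pvFold_some (ls : List String) :
    ∀ (d : PySem.Dict String String) (n : String) (buf : List String),
    pvFlushA (ls.foldl pvStepA (d, some n, buf)) =
      pvAltGo (ls.dropWhile (fun s => !pvIsHeader s))
        (d.insert n (pvBody (buf ++ ls.takeWhile (fun s => !pvIsHeader s)))) := by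
  induction ls with
  | nil =>
      intro d n buf
      simp [pvFlushA, pvAltGo]
  | cons l rest ih =>
      intro d n buf
      by_cases h : pvIsHeader l = true
      · simp only [List.foldl_cons, pvStepA, h, if_pos]
        rw [ih]
        rw [List.dropWhile_cons, List.takeWhile_cons]
        simp [h, pvAltGo]
      · simp only [List.foldl_cons, pvStepA, h, if_neg, Bool.false_eq_true, not_false_iff]
        rw [ih]
        rw [List.dropWhile_cons, List.takeWhile_cons]
        simp [h]

-- preamble invariant: with no pending name, buffered lines are dropped and A's fold
-- agrees with B after skipping up to the first header.
theorem pvFold_none (ls : List String) :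
    ∀ (d : PySem.Dict String String) (buf : List String),
    pvFlushA (ls.foldl pvStepA (d, none, buf)) =
      pvAltGo (ls.dropWhile (fun s => !pvIsHeader s)) d := by
  induction ls with
  | nil =>
      intro d buf
      simp [pvFlushA, pvAltGo]
  | cons l rest ih =>
      intro d buf
      by_cases h : pvIsHeader l = true
      · simp only [List.foldl_cons, pvStepA, h, if_pos]
        rw [pvFold_some]
        rw [List.dropWhile_cons]
        simp [h, pvAltGo]
      · simp only [List.foldl_cons, pvStepA, h, if_neg, Bool.false_eq_true, not_false_iff]
        rw [ih]
        rw [List.dropWhile_cons]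
        simp [h]

-- ===== VERDICT (by name: the statement is the Claim_ definition above) =====
theorem split_batched_pdf_text_py_spec : Claim_equal_split_batched_pdf_text_py := by
  intro text _
  unfold Spec_split_batched_pdf_text_py split_batched_pdf_text_py split_batched_pdf_text_py_alt
  rw [pvFold_none]
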